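-- pv_equiv track=rewrite | github.com/BryanJSPY/demo_pyinstaller | get_data_fb.py | get_all_en_users_replied_recently_post
-- ===== SOURCE A (Python) =====
-- def get_all_en_users_replied_recently_post(total_en_users_comments_on_recently_post, all_users_replied_recently_post):
--     arr = []
--     m = ""
--     for x in total_en_users_comments_on_recently_post:
--         if m == "":
--             for y in all_users_replied_recently_post:
--                 if x.find(y) != -1:
--                     arr.append(y)
--                     m = y
--                     break
--
--         else:
--             for m in all_users_replied_recently_post:
--                 if x.find(m) != -1:
--                     arr.append(
--                         m)
--                     m = m
--                     break
--     return arr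
-- ===== SOURCE B (Python) =====
-- def get_all_en_users_replied_recently_post(total_en_users_comments_on_recently_post, all_users_replied_recently_post):
--     # User-major pass: for each username (in list order) mark the comments it is
--     # a substring of, never overwriting an earlier (lower-index) user's mark;
--     # then emit the marks in comment order, skipping unmatched comments.
--     best = [None] * len(total_en_users_comments_on_recently_post)
--     for u in all_users_replied_recently_post:
--         best = [u if b is None and u in c else b
--                 for c, b in zip(total_en_users_comments_on_recently_post, best)]
--     return [b for b in best if b is not None]
-- ===== Notes on version B (the rewrite author's own statement) =====
-- stated objective: alternative
-- what changed: A scans users inside a comment loop carrying a dead 'm' state variable with two duplicated branches; B swaps the nesting: one pass per user marks the comments it matches (first user wins), then the marks are emitted in comment order.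
import Mathlib
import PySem

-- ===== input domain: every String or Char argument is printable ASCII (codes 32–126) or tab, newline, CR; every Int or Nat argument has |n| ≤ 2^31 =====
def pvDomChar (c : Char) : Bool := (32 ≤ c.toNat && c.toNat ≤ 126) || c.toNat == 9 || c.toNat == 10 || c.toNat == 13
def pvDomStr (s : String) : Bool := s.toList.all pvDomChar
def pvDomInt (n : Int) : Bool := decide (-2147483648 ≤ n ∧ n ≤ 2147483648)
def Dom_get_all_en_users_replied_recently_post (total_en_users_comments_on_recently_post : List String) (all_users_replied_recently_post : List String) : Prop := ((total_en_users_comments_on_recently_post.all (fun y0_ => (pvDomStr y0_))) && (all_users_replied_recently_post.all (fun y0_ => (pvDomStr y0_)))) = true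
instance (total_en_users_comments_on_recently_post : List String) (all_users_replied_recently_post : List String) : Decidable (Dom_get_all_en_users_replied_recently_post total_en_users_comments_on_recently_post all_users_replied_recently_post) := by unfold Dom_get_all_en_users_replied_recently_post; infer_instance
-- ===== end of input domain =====

-- B replaces A's comment-major double loop (with its dead `m` state and duplicated branches)
-- by a user-major marking pass of the same cost; return value only, no mutation is observable.

-- ===== PORT A =====
-- inner loop of A's `m == ""` branch: scan users, append first substring match, set m to it
def pvInner1 (x : String) (arr : List String) : List String → List String × String
  | [] => (arr, "")
  | y :: ys => if PySem.Str.find x y != -1 then (arr ++ [y], y) else pvInner1 x arr ys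

-- inner loop of A's else branch: `for m in users` rebinds m each step even without a match
def pvInner2 (x : String) (arr : List String) (m : String) : List String → List String × String
  | [] => (arr, m)
  | y :: ys => if PySem.Str.find x y != -1 then (arr ++ [y], y) else pvInner2 x arr y ys

def get_all_en_users_replied_recently_post (total_en_users_comments_on_recently_post : List String) (all_users_replied_recently_post : List String) : List String :=
  (total_en_users_comments_on_recently_post.foldl
    (fun st x =>
      if st.2 = "" then pvInner1 x st.1 all_users_replied_recently_post
      else pvInner2 x st.1 st.2 all_users_replied_recently_post)
    ([], "")).1

-- ===== PORT B =====
-- one user-pass of B: mark each still-unmatched comment that contains u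
def pvStepB (comments : List String) (best : List (Option String)) (u : String) : List (Option String) :=
  (comments.zip best).map (fun cb => if cb.2.isNone && PySem.Str.isIn u cb.1 then some u else cb.2)

def get_all_en_users_replied_recently_post_alt (total_en_users_comments_on_recently_post : List String) (all_users_replied_recently_post : List String) : List String :=
  (all_users_replied_recently_post.foldl
    (pvStepB total_en_users_comments_on_recently_post)
    (List.replicate total_en_users_comments_on_recently_post.length none)).filterMap id

-- ===== PRECONDITION & SPEC =====
def Spec_get_all_en_users_replied_recently_post (total_en_users_comments_on_recently_post : List String) (all_users_replied_recently_post : List String) (out : List String) : Prop := out = get_all_en_users_replied_recently_post_alt total_en_users_comments_on_recently_post all_users_replied_recently_post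
instance (total_en_users_comments_on_recently_post : List String) (all_users_replied_recently_post : List String) (out : List String) : Decidable (Spec_get_all_en_users_replied_recently_post total_en_users_comments_on_recently_post all_users_replied_recently_post out) := by unfold Spec_get_all_en_users_replied_recently_post; infer_instance

-- ===== CLAIM (what is proved, stated in full; the proofs are below) =====
def Claim_equal_get_all_en_users_replied_recently_post : Prop := ∀ (total_en_users_comments_on_recently_post : List String) (all_users_replied_recently_post : List String), Dom_get_all_en_users_replied_recently_post total_en_users_comments_on_recently_post all_users_replied_recently_post → Spec_get_all_en_users_replied_recently_post total_en_users_comments_on_recently_post all_users_replied_recently_post (get_all_en_users_replied_recently_post total_en_users_comments_on_recently_post all_users_replied_recently_post)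

-- ===== LEMMAS AND PROOFS =====

-- ===== VERDICT (by name: the statement is the Claim_ definition above) =====
-- the two substring tests agree
theorem pv_pred_eq (x y : String) : (PySem.Str.find x y != -1) = PySem.Str.isIn y x := by
  rw [Bool.eq_iff_iff]
  simp [bne_iff_ne, PySem.Chars.find_ne_neg_one_iff, PySem.Chars.isIn_iff_infix]

theorem pvInner1_fst (x : String) (ys : List String) : ∀ arr,
    (pvInner1 x arr ys).1 = arr ++ (ys.find? (fun y => PySem.Str.find x y != -1)).toList := by
  induction ys with
  | nil => intro arr; simp [pvInner1]
  | cons y ys ih =>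
    intro arr
    by_cases hf : PySem.Chars.find x.toList y.toList = -1 <;>
      simp [pvInner1, hf, bne_iff_ne, ih]

theorem pvInner2_fst (x : String) (ys : List String) : ∀ arr m,
    (pvInner2 x arr m ys).1 = arr ++ (ys.find? (fun y => PySem.Str.find x y != -1)).toList := by
  induction ys with
  | nil => intro arr m; simp [pvInner2]
  | cons y ys ih =>
    intro arr m
    by_cases hf : PySem.Chars.find x.toList y.toList = -1 <;>
      simp [pvInner2, hf, bne_iff_ne, ih]

-- A's outer loop appends, per comment, the first user that is a substring of it;
-- the carried m only selects between two branches with identical effect on arr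
theorem pvA_loop (users : List String) (cs : List String) : ∀ arr m,
    (cs.foldl
      (fun st x => if st.2 = "" then pvInner1 x st.1 users else pvInner2 x st.1 st.2 users)
      (arr, m)).1
    = arr ++ cs.filterMap (fun x => users.find? (fun y => PySem.Str.find x y != -1)) := by
  induction cs with
  | nil => intro arr m; simp
  | cons x cs ih =>
    intro arr m
    rw [List.foldl_cons]
    rcases h : (if ((arr, m).2 = "") then pvInner1 x (arr, m).1 users
        else pvInner2 x (arr, m).1 (arr, m).2 users) with ⟨arr', m'⟩
    have h1 : arr' = arr ++ (users.find? (fun y => PySem.Str.find x y != -1)).toList := by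
      by_cases hm : m = "" <;> simp only [hm, if_true, if_false] at h
      · have := congrArg Prod.fst h
        rw [pvInner1_fst] at this
        exact this.symm
      · have := congrArg Prod.fst h
        rw [pvInner2_fst] at this
        exact this.symm
    cases hf : users.find? (fun y => PySem.Str.find x y != -1) <;>
      rw [ih arr' m', h1] <;> simp only [List.filterMap_cons, hf, Option.toList] <;> simp

theorem pvStepB_map (comments : List String) (f : String → Option String) (u : String) :
    pvStepB comments (comments.map f) u
    = comments.map (fun c => if (f c).isNone && PySem.Str.isIn u c then some u else f c) := by
  induction comments with
  | nil => rfl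
  | cons c cs ih =>
    simp only [pvStepB, List.map_cons, List.zip_cons_cons] at ih ⊢
    rw [ih]

theorem pvB_loop (comments : List String) : ∀ (users : List String) (f : String → Option String),
    users.foldl (pvStepB comments) (comments.map f)
    = comments.map (fun c =>
        match f c with
        | some y => some y
        | none => users.find? (fun y => PySem.Str.isIn y c)) := by
  intro users
  induction users with
  | nil =>
    intro f
    apply List.map_congr_left
    intro c _
    cases h : f c <;> simp
  | cons u us ih =>
    intro f
    rw [List.foldl_cons, pvStepB_map, ih]
    apply List.map_congr_left
    intro c _
    cases h : f c with
    | some y => simp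
    | none =>
      cases hu : PySem.Chars.isIn u.toList c.toList <;>
        simp [h, hu]

theorem get_all_en_users_replied_recently_post_spec : Claim_equal_get_all_en_users_replied_recently_post := by
  intro cs users _
  unfold Spec_get_all_en_users_replied_recently_post
  unfold get_all_en_users_replied_recently_post get_all_en_users_replied_recently_post_alt
  have hrep : List.replicate cs.length (none : Option String) = cs.map (fun _ => none) := by
    simp
  rw [pvA_loop, hrep, pvB_loop, List.filterMap_map]
  simp only [List.nil_append, Function.comp_def, id]
  apply List.filterMap_congr
  intro x _
  show List.find? (fun y => PySem.Str.find x y != -1) users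
      = List.find? (fun y => PySem.Str.isIn y x) users
  rw [funext (pv_pred_eq x)]
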